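-- pv_equiv track=rewrite | github.com/Raj-Ghosh-10/LeetCode-Daily | NOVEMBER-2025/17-11-2025/1437.py | kLengthApart
-- ===== SOURCE A (Python) =====
-- def kLengthApart(nums, k):
--     """
--     :type nums: List[int]
--     :type k: int
--     :rtype: bool
--     """
--     prev = -1
--
--     for i, val in enumerate(nums):
--         if val == 1:
--             if prev != -1 and (i - prev - 1) < k:
--                 return False
--             prev = i
--
--     return True
-- ===== SOURCE B (Python) =====
-- def kLengthApart(nums, k):
--     ones = [i for i, v in enumerate(nums) if v == 1]
--     return all(ones[j] - ones[j - 1] - 1 >= k for j in range(1, len(ones)))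
-- ===== Notes on version B (the rewrite author's own statement) =====
-- stated objective: alternative
-- what changed: Replaces the single-pass prev-tracking loop with a two-phase structure: first collect the list of indices of 1s, then scan consecutive pairs of that list checking each gap.
import Mathlib
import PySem

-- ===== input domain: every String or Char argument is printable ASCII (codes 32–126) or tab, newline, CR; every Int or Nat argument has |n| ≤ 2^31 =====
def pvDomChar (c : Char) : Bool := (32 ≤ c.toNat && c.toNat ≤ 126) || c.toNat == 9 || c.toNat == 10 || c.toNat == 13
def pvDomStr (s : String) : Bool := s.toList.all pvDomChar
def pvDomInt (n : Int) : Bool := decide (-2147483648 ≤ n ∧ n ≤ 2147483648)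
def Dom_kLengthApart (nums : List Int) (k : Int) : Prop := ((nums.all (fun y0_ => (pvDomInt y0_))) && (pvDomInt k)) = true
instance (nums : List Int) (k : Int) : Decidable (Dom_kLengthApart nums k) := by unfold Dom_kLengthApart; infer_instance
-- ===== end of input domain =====

-- B replaces A's single-pass prev-tracking loop by a two-phase structure (collect indices of 1s, then check consecutive gaps); objective: alternative decomposition, same cost.

-- ===== PORT A =====
-- loop over enumerate(nums) carrying the running index i and prev; early `return False` becomes returning false
def kLengthApartLoop (l : List Int) (i : Int) (prev : Int) (k : Int) : Bool :=
  match l with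
  | [] => true
  | v :: rest =>
    if v == 1 then
      if prev != -1 && decide (i - prev - 1 < k) then false
      else kLengthApartLoop rest (i + 1) i k
    else kLengthApartLoop rest (i + 1) prev k

def kLengthApart (nums : List Int) (k : Int) : Bool :=
  kLengthApartLoop nums 0 (-1) k

-- ===== PORT B =====
-- phase 1: the list comprehension [i for i, v in enumerate(nums) if v == 1]
def kLengthApartOnes (l : List Int) (i : Int) : List Int :=
  match l with
  | [] => []
  | v :: rest => if v == 1 then i :: kLengthApartOnes rest (i + 1) else kLengthApartOnes rest (i + 1)

-- phase 2: all(ones[j] - ones[j-1] - 1 >= k for j in range(1, len(ones)))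
def kLengthApartPairs (ones : List Int) (k : Int) : Bool :=
  match ones with
  | [] => true
  | [_] => true
  | a :: b :: rest => decide (b - a - 1 ≥ k) && kLengthApartPairs (b :: rest) k

def kLengthApart_alt (nums : List Int) (k : Int) : Bool :=
  kLengthApartPairs (kLengthApartOnes nums 0) k

-- ===== PRECONDITION & SPEC =====
def Spec_kLengthApart (nums : List Int) (k : Int) (out : Bool) : Prop := out = kLengthApart_alt nums k
instance (nums : List Int) (k : Int) (out : Bool) : Decidable (Spec_kLengthApart nums k out) := by unfold Spec_kLengthApart; infer_instance

-- ===== CLAIM (what is proved, stated in full; the proofs are below) =====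
def Claim_equal_kLengthApart : Prop := ∀ (nums : List Int) (k : Int), Dom_kLengthApart nums k → Spec_kLengthApart nums k (kLengthApart nums k)

-- ===== LEMMAS AND PROOFS =====

-- invariant: once a 1 has been seen at nonnegative index `prev`, the loop equals the pair check seeded with prev
theorem kLengthApartLoop_some (l : List Int) (i prev k : Int) (hi : 0 ≤ i) (hp : 0 ≤ prev) :
    kLengthApartLoop l i prev k = kLengthApartPairs (prev :: kLengthApartOnes l i) k := by
  induction l generalizing i prev with
  | nil => simp [kLengthApartLoop, kLengthApartOnes, kLengthApartPairs]
  | cons v rest ih =>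
    by_cases hv : v = 1
    · have hne : (prev != -1) = true := by simp [bne]; omega
      by_cases hlt : i - prev - 1 < k
      · simp [kLengthApartLoop, kLengthApartOnes, kLengthApartPairs, hv, hne, hlt]
        omega
      · simp [kLengthApartLoop, kLengthApartOnes, kLengthApartPairs, hv, hne, hlt,
          ih (i + 1) i (by omega) (by omega)]
        omega
    · simp [kLengthApartLoop, kLengthApartOnes, hv, ih (i + 1) prev (by omega) hp]

-- before any 1 is seen (prev = -1) the loop equals the pair check on the remaining ones
theorem kLengthApartLoop_none (l : List Int) (i k : Int) (hi : 0 ≤ i) :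
    kLengthApartLoop l i (-1) k = kLengthApartPairs (kLengthApartOnes l i) k := by
  induction l generalizing i with
  | nil => simp [kLengthApartLoop, kLengthApartOnes, kLengthApartPairs]
  | cons v rest ih =>
    by_cases hv : v = 1
    · simp [kLengthApartLoop, kLengthApartOnes, hv,
        kLengthApartLoop_some rest (i + 1) i k (by omega) hi]
    · simp [kLengthApartLoop, kLengthApartOnes, hv, ih (i + 1) (by omega)]

-- ===== VERDICT (by name: the statement is the Claim_ definition above) =====
theorem kLengthApart_spec : Claim_equal_kLengthApart := by
  intro nums k _
  unfold Spec_kLengthApart kLengthApart kLengthApart_alt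
  exact kLengthApartLoop_none nums 0 k (by omega)
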